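-- pv_equiv track=rewrite | github.com/mhmdez/adw | src/adw/integrations/issue_parser.py | extract_config_from_labels
-- ===== SOURCE A (Python) =====
-- def extract_config_from_labels(labels: list[str]) -> dict[str, str | None]:
--     """Extract workflow and model configuration from GitHub labels.
--
--     Supports label formats:
--     - workflow:simple, workflow:standard, workflow:sdlc
--     - model:sonnet, model:opus, model:haiku
--     - priority:p0, priority:p1, priority:p2
--     - type:bug, type:feature, etc.
--
--     Args:
--         labels: List of GitHub label names.
--
--     Returns:
--         Dictionary with workflow, model, priority, and type (or None if not found).
--     """
--     config: dict[str, str | None] = {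
--         "workflow": None,
--         "model": None,
--         "priority": None,
--         "type": None,
--     }
--
--     # Valid workflow names (all built-in workflows)
--     valid_workflows = ("simple", "standard", "sdlc", "bug-fix", "prototype")
--     # Workflow aliases
--     workflow_aliases = {"bugfix": "bug-fix", "bug_fix": "bug-fix"}
--
--     for label in labels:
--         label_lower = label.lower()
--
--         # Check for prefixed labels (workflow:sdlc, model:opus, etc.)
--         if ":" in label_lower:
--             prefix, value = label_lower.split(":", 1)
--             # Normalize workflow aliases
--             if prefix == "workflow":
--                 value = workflow_aliases.get(value, value)
--                 if value in valid_workflows: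
--                     config["workflow"] = value
--             elif prefix == "model" and value in ("sonnet", "opus", "haiku"):
--                 config["model"] = value
--             elif prefix == "priority" and value in ("p0", "p1", "p2", "p3"):
--                 config["priority"] = value
--             elif prefix == "type" and value in ("bug", "feature", "refactor", "docs", "test", "chore"):
--                 config["type"] = value
--
--         # Check for direct label matches (e.g., label named "sdlc" or "opus")
--         else:
--             # Normalize workflow aliases
--             normalized = workflow_aliases.get(label_lower, label_lower)
--             if normalized in valid_workflows:
--                 config["workflow"] = normalized
--             elif label_lower in ("sonnet", "opus", "haiku"):
--                 config["model"] = label_lower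
--             elif label_lower in ("p0", "p1", "p2", "p3"):
--                 config["priority"] = label_lower
--             elif label_lower in ("bug", "feature", "refactor", "docs", "test", "chore"):
--                 config["type"] = label_lower
--
--     return config
-- ===== SOURCE B (Python) =====
-- _ALIASES = {"bugfix": "bug-fix", "bug_fix": "bug-fix"}
-- _VALID = {
--     "workflow": ("simple", "standard", "sdlc", "bug-fix", "prototype"),
--     "model": ("sonnet", "opus", "haiku"),
--     "priority": ("p0", "p1", "p2", "p3"),
--     "type": ("bug", "feature", "refactor", "docs", "test", "chore"),
-- }
-- # Flat reverse index for bare labels: value (or workflow alias) -> (config key, normalized value).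
-- _BARE = {v: (key, v) for key, vals in _VALID.items() for v in vals}
-- for _a, _v in _ALIASES.items():
--     _BARE[_a] = ("workflow", _v)
--
--
-- def extract_config_from_labels(labels):
--     config = {"workflow": None, "model": None, "priority": None, "type": None}
--     for label in labels:
--         low = label.lower()
--         if ":" in low:
--             prefix, value = low.split(":", 1)
--             if prefix == "workflow":
--                 value = _ALIASES.get(value, value)
--             allowed = _VALID.get(prefix)
--             if allowed is not None and value in allowed:
--                 config[prefix] = value
--         else:
--             hit = _BARE.get(low)
--             if hit is not None:
--                 config[hit[0]] = hit[1]
--     return config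
-- ===== Notes on version B (the rewrite author's own statement) =====
-- stated objective: simpler
-- what changed: Replaced A's two four-way elif ladders by a table of valid values per config key (one lookup validates any prefixed label) and a flat reverse index mapping each bare value or alias to its (key, value) pair, so bare labels are classified by one indexed dict lookup instead of alias-then-ladder of tuple membership tests.
import Mathlib
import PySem

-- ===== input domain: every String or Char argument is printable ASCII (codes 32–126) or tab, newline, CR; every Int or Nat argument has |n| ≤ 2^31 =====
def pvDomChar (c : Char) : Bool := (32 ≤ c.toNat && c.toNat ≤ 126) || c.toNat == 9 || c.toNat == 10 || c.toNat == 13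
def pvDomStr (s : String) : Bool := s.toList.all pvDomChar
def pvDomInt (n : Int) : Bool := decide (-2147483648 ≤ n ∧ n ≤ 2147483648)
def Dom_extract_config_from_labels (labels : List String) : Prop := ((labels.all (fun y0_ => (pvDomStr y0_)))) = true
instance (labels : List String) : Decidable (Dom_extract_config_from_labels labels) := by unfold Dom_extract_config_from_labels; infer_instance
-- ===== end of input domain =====

-- B replaces A's two four-way elif ladders by one table of valid values per key and a flat
-- reverse index for bare labels (objective: simpler); the return value is the same dict.

-- ===== PORT A =====
def pvWorkflows : List String := ["simple", "standard", "sdlc", "bug-fix", "prototype"]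

def pvAliases : PySem.Dict String String :=
  PySem.Dict.ofList [("bugfix", "bug-fix"), ("bug_fix", "bug-fix")]

def pvConfig0 : PySem.Dict String (Option String) :=
  PySem.Dict.ofList [("workflow", none), ("model", none), ("priority", none), ("type", none)]

-- loop body of A (elif ladders kept as nested ifs in the same order)
def pvStepA (cfg : PySem.Dict String (Option String)) (label : String) :
    PySem.Dict String (Option String) :=
  let low := PySem.Str.lower label
  if PySem.Str.isIn ":" low then
    match PySem.Str.splitMax? low ":" 1 with
    | some (pre :: value :: _) =>
      if pre = "workflow" then
        let value := (pvAliases.get? value).getD value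
        if value ∈ pvWorkflows then cfg.insert "workflow" (some value) else cfg
      else if pre = "model" ∧ value ∈ ["sonnet", "opus", "haiku"] then
        cfg.insert "model" (some value)
      else if pre = "priority" ∧ value ∈ ["p0", "p1", "p2", "p3"] then
        cfg.insert "priority" (some value)
      else if pre = "type" ∧ value ∈ ["bug", "feature", "refactor", "docs", "test", "chore"] then
        cfg.insert "type" (some value)
      else cfg
    | _ => cfg   -- unreachable: split(":",1) with ":" in low yields exactly two pieces
  else
    let normalized := (pvAliases.get? low).getD low
    if normalized ∈ pvWorkflows then cfg.insert "workflow" (some normalized)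
    else if low ∈ ["sonnet", "opus", "haiku"] then cfg.insert "model" (some low)
    else if low ∈ ["p0", "p1", "p2", "p3"] then cfg.insert "priority" (some low)
    else if low ∈ ["bug", "feature", "refactor", "docs", "test", "chore"] then
      cfg.insert "type" (some low)
    else cfg

def extract_config_from_labels (labels : List String) : List (String × Option String) :=
  (labels.foldl pvStepA pvConfig0).items

-- ===== PORT B =====
def pvValid : PySem.Dict String (List String) :=
  PySem.Dict.ofList
    [("workflow", ["simple", "standard", "sdlc", "bug-fix", "prototype"]),
     ("model", ["sonnet", "opus", "haiku"]),
     ("priority", ["p0", "p1", "p2", "p3"]),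
     ("type", ["bug", "feature", "refactor", "docs", "test", "chore"])]

-- _BARE = {v: (key, v) for key, vals in _VALID.items() for v in vals}; then the alias loop
def pvBare : PySem.Dict String (String × String) :=
  pvAliases.items.foldl (fun d av => d.insert av.1 ("workflow", av.2))
    (pvValid.items.foldl
      (fun d kv => kv.2.foldl (fun d v => d.insert v (kv.1, v)) d)
      PySem.Dict.empty)

-- loop body of B: one validity lookup for prefixed labels, one reverse-index lookup for bare ones
def pvStepB (cfg : PySem.Dict String (Option String)) (label : String) :
    PySem.Dict String (Option String) :=
  let low := PySem.Str.lower label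
  if PySem.Str.isIn ":" low then
    match PySem.Str.splitMax? low ":" 1 with
    | some (pre :: value :: _) =>
      let value := if pre = "workflow" then (pvAliases.get? value).getD value else value
      match pvValid.get? pre with
      | some allowed => if value ∈ allowed then cfg.insert pre (some value) else cfg
      | none => cfg
    | _ => cfg   -- unreachable, as in port A
  else
    match pvBare.get? low with
    | some hit => cfg.insert hit.1 (some hit.2)
    | none => cfg

def extract_config_from_labels_alt (labels : List String) : List (String × Option String) :=
  (labels.foldl pvStepB pvConfig0).items

-- ===== PRECONDITION & SPEC =====
def Spec_extract_config_from_labels (labels : List String) (out : List (String × Option String)) : Prop := out = extract_config_from_labels_alt labels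
instance (labels : List String) (out : List (String × Option String)) : Decidable (Spec_extract_config_from_labels labels out) := by unfold Spec_extract_config_from_labels; infer_instance

-- ===== CLAIM (what is proved, stated in full; the proofs are below) =====
def Claim_equal_extract_config_from_labels : Prop := ∀ (labels : List String), Dom_extract_config_from_labels labels → Spec_extract_config_from_labels labels (extract_config_from_labels labels)

-- ===== LEMMAS AND PROOFS =====

theorem pvStep_eq (cfg : PySem.Dict String (Option String)) (label : String) :
    pvStepA cfg label = pvStepB cfg label := by
  simp only [pvStepA, pvStepB]
  generalize PySem.Str.lower label = low
  by_cases hc : PySem.Str.isIn ":" low = true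
  · rw [if_pos hc, if_pos hc]
    cases hs : PySem.Str.splitMax? low ":" 1 with
    | none => rfl
    | some parts =>
      rcases parts with _ | ⟨p, _ | ⟨v, rest⟩⟩
      · rfl
      · rfl
      · by_cases hw : p = "workflow"
        · subst hw
          simp [pvWorkflows, show pvValid.get? "workflow" = some ["simple", "standard", "sdlc", "bug-fix", "prototype"] from rfl]
        by_cases hm : p = "model"
        · subst hm
          simp [show pvValid.get? "model" = some ["sonnet", "opus", "haiku"] from rfl]
        by_cases hp : p = "priority"
        · subst hp
          simp [show pvValid.get? "priority" = some ["p0", "p1", "p2", "p3"] from rfl]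
        by_cases ht : p = "type"
        · subst ht
          simp [show pvValid.get? "type" = some ["bug", "feature", "refactor", "docs", "test", "chore"] from rfl]
        have hv : pvValid.get? p = none := by
          simp [show pvValid = PySem.Dict.mk [("workflow", ["simple", "standard", "sdlc", "bug-fix", "prototype"]), ("model", ["sonnet", "opus", "haiku"]), ("priority", ["p0", "p1", "p2", "p3"]), ("type", ["bug", "feature", "refactor", "docs", "test", "chore"])] from rfl,
                PySem.Dict.get?, Ne.symm hw, Ne.symm hm, Ne.symm hp, Ne.symm ht]
        simp [hv, hw, hm, hp, ht]
  · rw [if_neg hc, if_neg hc]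
    by_cases h0 : low = "simple"
    · subst h0; rfl
    by_cases h1 : low = "standard"
    · subst h1; rfl
    by_cases h2 : low = "sdlc"
    · subst h2; rfl
    by_cases h3 : low = "bug-fix"
    · subst h3; rfl
    by_cases h4 : low = "prototype"
    · subst h4; rfl
    by_cases h5 : low = "sonnet"
    · subst h5; rfl
    by_cases h6 : low = "opus"
    · subst h6; rfl
    by_cases h7 : low = "haiku"
    · subst h7; rfl
    by_cases h8 : low = "p0"
    · subst h8; rfl
    by_cases h9 : low = "p1"
    · subst h9; rfl
    by_cases h10 : low = "p2"
    · subst h10; rfl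
    by_cases h11 : low = "p3"
    · subst h11; rfl
    by_cases h12 : low = "bug"
    · subst h12; rfl
    by_cases h13 : low = "feature"
    · subst h13; rfl
    by_cases h14 : low = "refactor"
    · subst h14; rfl
    by_cases h15 : low = "docs"
    · subst h15; rfl
    by_cases h16 : low = "test"
    · subst h16; rfl
    by_cases h17 : low = "chore"
    · subst h17; rfl
    by_cases h18 : low = "bugfix"
    · subst h18; rfl
    by_cases h19 : low = "bug_fix"
    · subst h19; rfl
    have ha : pvAliases.get? low = none := by
      simp [show pvAliases = PySem.Dict.mk [("bugfix", "bug-fix"), ("bug_fix", "bug-fix")] from rfl,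
            PySem.Dict.get?, Ne.symm h18, Ne.symm h19]
    have hb : pvBare.get? low = none := by
      simp [show pvBare = PySem.Dict.mk [("simple", ("workflow", "simple")), ("standard", ("workflow", "standard")), ("sdlc", ("workflow", "sdlc")), ("bug-fix", ("workflow", "bug-fix")), ("prototype", ("workflow", "prototype")), ("sonnet", ("model", "sonnet")), ("opus", ("model", "opus")), ("haiku", ("model", "haiku")), ("p0", ("priority", "p0")), ("p1", ("priority", "p1")), ("p2", ("priority", "p2")), ("p3", ("priority", "p3")), ("bug", ("type", "bug")), ("feature", ("type", "feature")), ("refactor", ("type", "refactor")), ("docs", ("type", "docs")), ("test", ("type", "test")), ("chore", ("type", "chore")), ("bugfix", ("workflow", "bug-fix")), ("bug_fix", ("workflow", "bug-fix"))] from rfl, PySem.Dict.get?, Ne.symm h0, Ne.symm h1, Ne.symm h2, Ne.symm h3, Ne.symm h4, Ne.symm h5, Ne.symm h6, Ne.symm h7, Ne.symm h8, Ne.symm h9, Ne.symm h10, Ne.symm h11, Ne.symm h12, Ne.symm h13, Ne.symm h14, Ne.symm h15, Ne.symm h16, Ne.symm h17, Ne.symm h18, Ne.symm h19]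
    simp [ha, hb, pvWorkflows, h0, h1, h2, h3, h4, h5, h6, h7, h8, h9, h10, h11, h12, h13, h14, h15, h16, h17]

-- ===== VERDICT (by name: the statement is the Claim_ definition above) =====
theorem extract_config_from_labels_spec : Claim_equal_extract_config_from_labels := by
  intro labels _
  unfold Spec_extract_config_from_labels extract_config_from_labels extract_config_from_labels_alt
  rw [funext fun cfg => funext fun l => pvStep_eq cfg l]
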